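-- pv_equiv track=rewrite | github.com/BalerSon/Complexity-Algorithms | multiply_matrices.py | naive_matrix_multiply_z2
-- ===== SOURCE A (Python) =====
-- def naive_matrix_multiply_z2(A, B):
--     """Наивное умножение матриц над Z₂"""
--     n = len(A)
--     C = [[0] * n for _ in range(n)]
--
--     for i in range(n):
--         for k in range(n):
--             if A[i][k]:
--                 for j in range(n):
--                     C[i][j] ^= B[k][j]
--
--     return C
-- ===== SOURCE B (Python) =====
-- def naive_matrix_multiply_z2(A, B):
--     """Four-Russians style xor matrix multiply: per block of ~log2(n) columns of A,
--     precompute all xor-combinations of the corresponding rows of B once, then build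
--     each output row from one table lookup per block."""
--     n = len(A)
--     if n == 0:
--         return []
--     t = max(1, n.bit_length() - 1)
--     bases = list(range(0, n, t))
--     tables = []
--     for base in bases:
--         w = min(t, n - base)
--         combos = [[0] * n]
--         for s in range(w):
--             row = B[base + s]
--             combos = combos + [[c[j] ^ row[j] for j in range(n)] for c in combos]
--         tables.append(combos)
--     out = []
--     for Ai in A:
--         acc = [0] * n
--         for base, combos in zip(bases, tables):
--             w = min(t, n - base)
--             m = 0
--             for s in range(w):
--                 if Ai[base + s]:
--                     m |= 1 << s
--             c = combos[m]
--             acc = [acc[j] ^ c[j] for j in range(n)]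
--         out.append(acc)
--     return out
-- ===== Notes on version B (the rewrite author's own statement) =====
-- stated objective: faster
-- what changed: Replaces A's triple loop (xor-accumulating a row of B into C[i] for every nonzero A[i][k]) by a Method-of-Four-Russians scheme: columns of A are grouped into blocks of ~log2(n); for each block all 2^w xor-combinations of the corresponding rows of B are precomputed once, and each output row is assembled from one table lookup per block.
-- outside the precondition, e.g. on naive_matrix_multiply_z2([[0]], []): A returns [[0]], B raises IndexError; on naive_matrix_multiply_z2([[0, 1], [0, 2]], [[5], [6, 7]]): A returns [[6, 7], [6, 7]], B raises IndexError
import Mathlib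
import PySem

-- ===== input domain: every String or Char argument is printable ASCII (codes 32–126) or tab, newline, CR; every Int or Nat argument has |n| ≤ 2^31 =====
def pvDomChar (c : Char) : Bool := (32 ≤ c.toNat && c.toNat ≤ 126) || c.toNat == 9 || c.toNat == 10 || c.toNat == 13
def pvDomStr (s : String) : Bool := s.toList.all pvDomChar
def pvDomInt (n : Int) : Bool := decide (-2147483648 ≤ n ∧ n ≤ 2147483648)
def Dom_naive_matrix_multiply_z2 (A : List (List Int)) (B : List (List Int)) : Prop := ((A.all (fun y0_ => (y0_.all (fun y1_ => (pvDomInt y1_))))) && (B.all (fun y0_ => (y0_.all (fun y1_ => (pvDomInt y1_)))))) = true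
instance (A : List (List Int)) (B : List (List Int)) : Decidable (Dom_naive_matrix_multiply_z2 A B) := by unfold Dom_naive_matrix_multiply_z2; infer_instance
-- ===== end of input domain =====

-- B replaces A's cubic xor-accumulation by a Four-Russians scheme: per block of ~log2 n
-- columns of A it precomputes all xor-combinations of the matching rows of B once, then
-- assembles each output row from one table lookup per block (measured faster at large n).

-- ===== PORT A =====
-- Literal port of A. Loop indices come from range(n) and are in range under Pre_,
-- so list indexing is ported with getD (Python would raise only outside Pre_).
def naive_matrix_multiply_z2 (A : List (List Int)) (B : List (List Int)) : List (List Int) :=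
  let n := A.length
  -- C = [[0] * n for _ in range(n)]
  let C := (List.range n).map (fun _ => List.replicate n (0 : Int))
  (List.range n).foldl (fun C i =>
    (List.range n).foldl (fun C k =>
      if ((A.getD i []).getD k 0) ≠ 0 then          -- if A[i][k]:
        (List.range n).foldl (fun C j =>
          -- C[i][j] ^= B[k][j]
          C.set i ((C.getD i []).set j
            (PySem.Int.bxor ((C.getD i []).getD j 0) ((B.getD k []).getD j 0)))) C
      else C) C) C

-- ===== PORT B =====
-- helper for B's table building step (one `for s in range(w)` iteration on `combos`)
def pvCombosStep (B : List (List Int)) (n : Nat) (combos : List (List Int)) (k : Nat) :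
    List (List Int) :=
  let row := B.getD k []
  combos ++ combos.map (fun c =>
    (List.range n).map (fun j => PySem.Int.bxor (c.getD j 0) (row.getD j 0)))

-- Literal port of B (Source B).  `range(0, n, t)` (t > 0, n ≥ 0) is List.range' 0 ⌈n/t⌉ t;
-- the mask m is a nonnegative Python int, kept as a Nat (`|=`/`<<` are exact there).
def naive_matrix_multiply_z2_alt (A : List (List Int)) (B : List (List Int)) : List (List Int) :=
  let n := A.length
  if n = 0 then []
  else
    let t := max 1 (PySem.Int.bitLength (n : Int) - 1)   -- max(1, n.bit_length() - 1)
    let bases := List.range' 0 ((n + t - 1) / t) t       -- list(range(0, n, t))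
    let tables := bases.foldl (fun tables base =>
      let w := min t (n - base)
      let combos := (List.range w).foldl
        (fun combos s => pvCombosStep B n combos (base + s))
        [List.replicate n (0 : Int)]
      tables ++ [combos]) ([] : List (List (List Int)))
    A.foldl (fun out (Ai : List Int) =>
      let acc0 := List.replicate n (0 : Int)
      let acc := (bases.zip tables).foldl (fun (acc : List Int) (bc : Nat × List (List Int)) =>
        let base := bc.1
        let combos := bc.2
        let w := min t (n - base)
        let m := (List.range w).foldl
          (fun (m : Nat) s => if Ai.getD (base + s) (0 : Int) ≠ 0 then m ||| (1 <<< s) else m) 0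
        let c := combos.getD m []
        (List.range n).map (fun j => PySem.Int.bxor (acc.getD j 0) (c.getD j 0))) acc0
      out ++ [acc]) ([] : List (List Int))

-- ===== PRECONDITION & SPEC =====
-- Pre_ = rectangular-enough inputs: every row of A and every one of the first n = len(A)
-- rows of B has length ≥ n (and B has ≥ n rows).  This is slightly narrower than "A
-- returns": A also returns on inputs whose missing/short B-rows are skipped only because
-- the matching column of A is entirely zero, while B's table precomputation reads every
-- one of the first n rows of B and raises there.
def Pre_naive_matrix_multiply_z2 (A : List (List Int)) (B : List (List Int)) : Prop :=
  (∀ r ∈ A, A.length ≤ r.length) ∧ A.length ≤ B.length ∧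
    ∀ k, k < A.length → A.length ≤ (B.getD k []).length
instance (A : List (List Int)) (B : List (List Int)) :
    Decidable (Pre_naive_matrix_multiply_z2 A B) := by
  unfold Pre_naive_matrix_multiply_z2; infer_instance

def pvWitness_naive_matrix_multiply_z2 : List (List Int) × List (List Int) :=
  ([[1, 0], [1, 1]], [[1, 2], [3, 4]])

def Spec_naive_matrix_multiply_z2 (A : List (List Int)) (B : List (List Int)) (out : List (List Int)) : Prop := out = naive_matrix_multiply_z2_alt A B
instance (A : List (List Int)) (B : List (List Int)) (out : List (List Int)) : Decidable (Spec_naive_matrix_multiply_z2 A B out) := by unfold Spec_naive_matrix_multiply_z2; infer_instance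

-- ===== CLAIM (what is proved, stated in full; the proofs are below) =====
def Claim_equal_naive_matrix_multiply_z2 : Prop := ∀ (A : List (List Int)) (B : List (List Int)), Dom_naive_matrix_multiply_z2 A B → Pre_naive_matrix_multiply_z2 A B → Spec_naive_matrix_multiply_z2 A B (naive_matrix_multiply_z2 A B)

-- ===== LEMMAS AND PROOFS =====

-- ---- xor over Int: sign/magnitude coding, associativity ----
def pvMag (a : Int) : Nat := if a < 0 then (-a - 1).toNat else a.toNat
def pvDec (s : Bool) (m : Nat) : Int := if s then -(m : Int) - 1 else (m : Int)

theorem pvBxor_dec (a b : Int) :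
    PySem.Int.bxor a b = pvDec ((decide (a < 0)).xor (decide (b < 0))) (pvMag a ^^^ pvMag b) := by
  unfold PySem.Int.bxor pvDec pvMag
  split_ifs <;> (simp_all; try omega)

theorem pvMag_dec (s : Bool) (m : Nat) : pvMag (pvDec s m) = m := by
  cases s <;> (simp [pvMag, pvDec]; try omega)

theorem pvSgn_dec (s : Bool) (m : Nat) : decide (pvDec s m < 0) = s := by
  cases s <;> (simp [pvDec]; try omega)

theorem pvBxor_assoc (a b c : Int) :
    PySem.Int.bxor (PySem.Int.bxor a b) c = PySem.Int.bxor a (PySem.Int.bxor b c) := by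
  rw [pvBxor_dec a b, pvBxor_dec b c, pvBxor_dec (pvDec _ _) c, pvBxor_dec a (pvDec _ _),
    pvMag_dec, pvMag_dec, pvSgn_dec, pvSgn_dec, Bool.xor_assoc, Nat.xor_assoc]

theorem pvZero_bxor (a : Int) : PySem.Int.bxor 0 a = a := by
  rw [PySem.Int.bxor_comm]; exact PySem.Int.bxor_zero a

-- ---- the common scalar specification ----
def pvBv (Bm : List (List Int)) (k j : Nat) : Int := (Bm.getD k []).getD j 0

def pvScal (Bm : List (List Int)) (row : List Int) (ks : List Nat) (j : Nat) : Int :=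
  ks.foldl (fun a k => if row.getD k (0 : Int) ≠ 0 then PySem.Int.bxor a (pvBv Bm k j) else a) 0

def pvSpec (A B : List (List Int)) : List (List Int) :=
  (List.range A.length).map (fun i =>
    (List.range A.length).map (fun j => pvScal B (A.getD i []) (List.range A.length) j))

theorem pvScal_shift (Bm : List (List Int)) (row : List Int) (ks : List Nat) (j : Nat) (a : Int) :
    ks.foldl (fun a k => if row.getD k (0 : Int) ≠ 0 then PySem.Int.bxor a (pvBv Bm k j) else a) a
      = PySem.Int.bxor a (pvScal Bm row ks j) := by
  induction ks generalizing a with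
  | nil => simp [pvScal, PySem.Int.bxor_zero]
  | cons k ks ih =>
    rw [List.foldl_cons, ih]
    conv_rhs => rw [pvScal]
    rw [List.foldl_cons, ih]
    split_ifs with h
    · rw [pvZero_bxor, pvBxor_assoc]
    · rw [pvZero_bxor]
theorem pvGetD_set (l : List Int) (i j : Nat) (a : Int) :
    (l.set i a).getD j 0 = if i = j ∧ i < l.length then a else l.getD j 0 := by
  simp only [List.getD_eq_getElem?_getD, List.getElem?_set]
  split_ifs with h1 h2 h3 <;> (simp_all; try omega)

theorem pvEq_map_range (L : List Int) (n : Nat) (g : Nat → Int)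
    (h1 : L.length = n) (h2 : ∀ j, j < n → L.getD j 0 = g j) : L = (List.range n).map g := by
  apply List.ext_getElem (by simp [h1])
  intro j hj hj'
  have := h2 j (by simpa using hj')
  rw [List.getD_eq_getElem L 0 hj] at this
  simp [this]

theorem pvA_jloop (l : List Nat) (i : Nat) (v : Nat → Int) (C : List (List Int))
    (hi : i < C.length) :
    l.foldl (fun C j => C.set i ((C.getD i []).set j
        (PySem.Int.bxor ((C.getD i []).getD j 0) (v j)))) C
      = C.set i (l.foldl (fun r j => r.set j (PySem.Int.bxor (r.getD j 0) (v j))) (C.getD i [])) := by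
  induction l generalizing C with
  | nil => rw [List.foldl_nil, List.foldl_nil, List.getD_eq_getElem C [] hi, List.set_getElem_self]
  | cons j l ih =>
    simp only [List.foldl_cons]
    rw [ih _ (by simpa using hi)]
    have hg : (C.set i ((C.getD i []).set j (PySem.Int.bxor ((C.getD i []).getD j 0) (v j)))).getD i []
        = (C.getD i []).set j (PySem.Int.bxor ((C.getD i []).getD j 0) (v j)) := by
      rw [List.getD_eq_getElem _ [] (by simpa using hi), List.getElem_set, if_pos rfl]
    rw [hg, List.set_set]

theorem pvA_kloop (n : Nat) (i : Nat) (row : List Int) (Bm : List (List Int)) (ks : List Nat)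
    (C : List (List Int)) (hi : i < C.length) :
    ks.foldl (fun C k => if row.getD k (0 : Int) ≠ 0 then
        (List.range n).foldl (fun C j => C.set i ((C.getD i []).set j
          (PySem.Int.bxor ((C.getD i []).getD j 0) (pvBv Bm k j)))) C
      else C) C
    = C.set i (ks.foldl (fun r k => if row.getD k (0 : Int) ≠ 0 then
        (List.range n).foldl (fun r j => r.set j (PySem.Int.bxor (r.getD j 0) (pvBv Bm k j))) r
      else r) (C.getD i [])) := by
  induction ks generalizing C with
  | nil =>
    rw [List.foldl_nil, List.foldl_nil, List.getD_eq_getElem C [] hi, List.set_getElem_self]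
  | cons k ks ih =>
    rw [List.foldl_cons, List.foldl_cons]
    split_ifs with h
    · rw [pvA_jloop _ _ _ _ hi, ih _ (by simpa using hi)]
      have hg : (C.set i ((List.range n).foldl
            (fun r j => r.set j (PySem.Int.bxor (r.getD j 0) (pvBv Bm k j))) (C.getD i []))).getD i []
          = (List.range n).foldl (fun r j => r.set j (PySem.Int.bxor (r.getD j 0) (pvBv Bm k j)))
              (C.getD i []) := by
        rw [List.getD_eq_getElem _ [] (by simpa using hi), List.getElem_set, if_pos rfl]
      rw [hg, List.set_set]
    · exact ih C hi

theorem pvRow_jloop_aux (v : Nat → Int) (r : List Int) (m : Nat) :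
    ((List.range m).foldl (fun r j => r.set j (PySem.Int.bxor (r.getD j 0) (v j))) r).length
        = r.length
    ∧ ∀ j, ((List.range m).foldl (fun r j => r.set j (PySem.Int.bxor (r.getD j 0) (v j))) r).getD j 0
        = if j < m ∧ j < r.length then PySem.Int.bxor (r.getD j 0) (v j) else r.getD j 0 := by
  induction m with
  | zero => simp
  | succ m ih =>
    rw [List.range_succ, List.foldl_append, List.foldl_cons, List.foldl_nil]
    obtain ⟨hlen, hget⟩ := ih
    constructor
    · rw [List.length_set, hlen]
    · intro j
      rw [pvGetD_set, hlen, hget, hget]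
      by_cases hjm : j = m
      · subst hjm
        by_cases hlt : j < r.length
        · simp [hlt]
        · simp [hlt]
      · by_cases hjlt : j < m
        · simp only [hjlt, Nat.lt_succ_of_lt hjlt, true_and]
          split_ifs with h1 h2 <;> first
            | rfl
            | (exact absurd h1.1.symm hjm)
        · have hns : ¬ j < m + 1 := by omega
          simp only [hjlt, hns, false_and, if_false]
          split_ifs with h1 <;> first
            | rfl
            | (exact absurd h1.1.symm hjm)

theorem pvRow_jloop (n : Nat) (v : Nat → Int) (r : List Int) (hr : r.length = n) :
    (List.range n).foldl (fun r j => r.set j (PySem.Int.bxor (r.getD j 0) (v j))) r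
      = (List.range n).map (fun j => PySem.Int.bxor (r.getD j 0) (v j)) := by
  obtain ⟨hlen, hget⟩ := pvRow_jloop_aux v r n
  have e2 : ((List.range n).map (fun j => PySem.Int.bxor (r.getD j 0) (v j))).length = n := by simp
  apply List.ext_getElem (hlen.trans (hr.trans e2.symm))
  intro j hj hj'
  have hjn : j < n := by simpa using hj'
  have := hget j
  rw [if_pos ⟨hjn, by omega⟩] at this
  rw [← List.getD_eq_getElem _ 0 hj, this]
  simp

theorem pvRowA (n : Nat) (Bm : List (List Int)) (row : List Int) (ks : List Nat)
    (r : List Int) (hr : r.length = n) :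
    (ks.foldl (fun r k => if row.getD k (0 : Int) ≠ 0 then
        (List.range n).foldl (fun r j => r.set j (PySem.Int.bxor (r.getD j 0) (pvBv Bm k j))) r
      else r) r).length = n
    ∧ ∀ j, j < n →
      (ks.foldl (fun r k => if row.getD k (0 : Int) ≠ 0 then
          (List.range n).foldl (fun r j => r.set j (PySem.Int.bxor (r.getD j 0) (pvBv Bm k j))) r
        else r) r).getD j 0
      = ks.foldl (fun a k => if row.getD k (0 : Int) ≠ 0 then PySem.Int.bxor a (pvBv Bm k j) else a)
          (r.getD j 0) := by
  induction ks generalizing r with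
  | nil => exact ⟨hr, fun _ _ => rfl⟩
  | cons k ks ih =>
    simp only [List.foldl_cons]
    by_cases h : row.getD k (0 : Int) ≠ 0
    · simp only [if_pos h]
      rw [pvRow_jloop n _ r hr]
      obtain ⟨hlen, hget⟩ := ih ((List.range n).map fun j => PySem.Int.bxor (r.getD j 0) (pvBv Bm k j)) (by simp)
      refine ⟨hlen, fun j hj => ?_⟩
      rw [hget j hj, PySem.List.getD_map_range _ n j 0 hj]
    · simp only [if_neg h]
      exact ih r hr

theorem pvRowA_full (n : Nat) (Bm : List (List Int)) (row : List Int) :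
    (List.range n).foldl (fun r k => if row.getD k (0 : Int) ≠ 0 then
        (List.range n).foldl (fun r j => r.set j (PySem.Int.bxor (r.getD j 0) (pvBv Bm k j))) r
      else r) (List.replicate n (0 : Int))
    = (List.range n).map (fun j => pvScal Bm row (List.range n) j) := by
  obtain ⟨hlen, hget⟩ := pvRowA n Bm row (List.range n) (List.replicate n (0 : Int)) (by simp)
  refine pvEq_map_range _ n _ hlen (fun j hj => ?_)
  rw [hget j hj, List.getD_replicate _ hj]
  rfl

theorem pvA_iloop (Am Bm : List (List Int)) (n : Nat) (m : Nat) (hm : m ≤ n) :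
    (List.range m).foldl (fun C i =>
      (List.range n).foldl (fun C k => if (Am.getD i []).getD k (0 : Int) ≠ 0 then
        (List.range n).foldl (fun C j => C.set i ((C.getD i []).set j
          (PySem.Int.bxor ((C.getD i []).getD j 0) (pvBv Bm k j)))) C
      else C) C)
      ((List.range n).map (fun _ => List.replicate n (0 : Int)))
    = (List.range m).map (fun i =>
        (List.range n).map (fun j => pvScal Bm (Am.getD i []) (List.range n) j))
      ++ List.replicate (n - m) (List.replicate n (0 : Int)) := by
  induction m with
  | zero =>
    simp
  | succ m ih =>
    rw [List.range_succ, List.foldl_append, List.foldl_cons, List.foldl_nil, ih (by omega)]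
    have hlen : ((List.range m).map (fun i =>
        (List.range n).map (fun j => pvScal Bm (Am.getD i []) (List.range n) j))
      ++ List.replicate (n - m) (List.replicate n (0 : Int))).length = n := by
      simp; omega
    rw [pvA_kloop n m (Am.getD m []) Bm (List.range n) _ (by rw [hlen]; omega)]
    have hrep : List.replicate (n - m) (List.replicate n (0 : Int))
        = List.replicate n (0 : Int) :: List.replicate (n - m - 1) (List.replicate n (0 : Int)) := by
      rw [← List.replicate_succ]; congr 1; omega
    have hpre : ((List.range m).map (fun i =>
        (List.range n).map (fun j => pvScal Bm (Am.getD i []) (List.range n) j))).length = m := by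
      simp
    have hgd : (((List.range m).map (fun i =>
        (List.range n).map (fun j => pvScal Bm (Am.getD i []) (List.range n) j))
      ++ List.replicate (n - m) (List.replicate n (0 : Int))).getD m []) = List.replicate n (0 : Int) := by
      rw [List.getD_eq_getElem?_getD, List.getElem?_append_right (by omega), hpre, hrep]
      simp
    rw [hgd, pvRowA_full n Bm (Am.getD m [])]
    rw [List.set_append, if_neg (by omega), hpre, hrep]
    rw [Nat.sub_self]
    show _ ++ (_ :: _) = _
    simp [Nat.sub_sub]

theorem pvA_eq (A B : List (List Int)) :
    naive_matrix_multiply_z2 A B = pvSpec A B := by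
  have h := pvA_iloop A B A.length A.length le_rfl
  simp only [pvBv, Nat.sub_self, List.replicate_zero, List.append_nil] at h
  unfold naive_matrix_multiply_z2 pvSpec
  exact h
theorem pvCombos_spec (Bm : List (List Int)) (n base w : Nat) :
    ((List.range w).foldl (fun combos s => pvCombosStep Bm n combos (base + s))
        [List.replicate n (0 : Int)]).length = 2 ^ w
    ∧ ∀ m, m < 2 ^ w →
      (((List.range w).foldl (fun combos s => pvCombosStep Bm n combos (base + s))
          [List.replicate n (0 : Int)]).getD m []).length = n
      ∧ ∀ j, j < n →
        (((List.range w).foldl (fun combos s => pvCombosStep Bm n combos (base + s))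
            [List.replicate n (0 : Int)]).getD m []).getD j 0
          = (List.range w).foldl
              (fun a s => if m.testBit s then PySem.Int.bxor a (pvBv Bm (base + s) j) else a) 0 := by
  induction w with
  | zero =>
    refine ⟨rfl, fun m hm => ?_⟩
    interval_cases m
    exact ⟨by simp, fun j hj => by simp⟩
  | succ w ih =>
    obtain ⟨hlen, hmem⟩ := ih
    rw [List.range_succ, List.foldl_append, List.foldl_cons, List.foldl_nil]
    set combos := (List.range w).foldl (fun combos s => pvCombosStep Bm n combos (base + s))
        [List.replicate n (0 : Int)] with hc
    refine ⟨?_, fun m hm => ?_⟩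
    · simp [pvCombosStep, hlen]; ring
    · by_cases hlt : m < 2 ^ w
      · obtain ⟨h1, h2⟩ := hmem m hlt
        have hgd : (pvCombosStep Bm n combos (base + w)).getD m [] = combos.getD m [] := by
          rw [pvCombosStep, List.getD_eq_getElem?_getD, List.getElem?_append_left (by omega : m < combos.length),
            ← List.getD_eq_getElem?_getD]
        rw [hgd]
        refine ⟨h1, fun j hj => ?_⟩
        rw [h2 j hj, List.foldl_append, List.foldl_cons, List.foldl_nil,
          if_neg (by simp [Nat.testBit_lt_two_pow hlt])]
      · -- m = 2 ^ w + m0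
        set m0 := m - 2 ^ w with hm0
        have hm0lt : m0 < 2 ^ w := by
          have := Nat.pow_succ 2 w ▸ hm; omega
        have hmeq : m = 2 ^ w + m0 := by omega
        obtain ⟨h1, h2⟩ := hmem m0 hm0lt
        have hgd : (pvCombosStep Bm n combos (base + w)).getD m []
            = (List.range n).map (fun j => PySem.Int.bxor ((combos.getD m0 []).getD j 0)
                ((Bm.getD (base + w) []).getD j 0)) := by
          rw [pvCombosStep, List.getD_eq_getElem?_getD,
            List.getElem?_append_right (by omega : combos.length ≤ m)]
          rw [hlen]
          have : m - 2 ^ w = m0 := rfl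
          rw [this]
          rw [List.getElem?_map]
          have : combos[m0]? = some (combos.getD m0 []) := by
            rw [List.getElem?_eq_getElem (by omega : m0 < combos.length)]
            rw [List.getD_eq_getElem _ [] (by omega : m0 < combos.length)]
          rw [this]
          rfl
        rw [hgd]
        refine ⟨by simp, fun j hj => ?_⟩
        rw [PySem.List.getD_map_range _ n j 0 hj]
        rw [List.foldl_append, List.foldl_cons, List.foldl_nil]
        have hbit : m.testBit w = true := by
          rw [hmeq, Nat.testBit_two_pow_add_eq, Nat.testBit_lt_two_pow hm0lt]
          rfl
        rw [if_pos hbit]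
        congr 1
        rw [h2 j hj]
        apply PySem.List.foldl_congr_mem
        intro a s hs
        have hsw : s < w := by simpa using hs
        rw [hmeq, Nat.testBit_two_pow_add_gt hsw]

theorem pvMask_spec (row : List Int) (base w : Nat) :
    ((List.range w).foldl
        (fun (m : Nat) s => if row.getD (base + s) (0 : Int) ≠ 0 then m ||| (1 <<< s) else m) 0) < 2 ^ w
    ∧ ∀ s, ((List.range w).foldl
        (fun (m : Nat) s => if row.getD (base + s) (0 : Int) ≠ 0 then m ||| (1 <<< s) else m) 0).testBit s
      = (decide (s < w) && decide (row.getD (base + s) (0 : Int) ≠ 0)) := by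
  induction w with
  | zero => simp
  | succ w ih =>
    obtain ⟨hlt, hbit⟩ := ih
    rw [List.range_succ, List.foldl_append, List.foldl_cons, List.foldl_nil]
    constructor
    · split_ifs with h
      · apply Nat.or_lt_two_pow (by calc _ < 2 ^ w := hlt
          _ ≤ 2 ^ (w + 1) := Nat.pow_le_pow_right (by omega) (by omega))
        rw [Nat.one_shiftLeft]
        exact Nat.pow_lt_pow_right (by omega) (by omega)
      · calc _ < 2 ^ w := hlt
          _ ≤ 2 ^ (w + 1) := Nat.pow_le_pow_right (by omega) (by omega)
    · intro s
      split_ifs with h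
      · rw [Nat.testBit_or, hbit, Nat.one_shiftLeft, Nat.testBit_two_pow]
        by_cases hs : s = w
        · subst hs; simp; simpa [List.getD_eq_getElem?_getD] using h
        · by_cases hsw : s < w
          · simp [hsw, Nat.lt_succ_of_lt hsw, Ne.symm hs]
          · have : ¬ s < w + 1 := by omega
            simp [hsw, this, Ne.symm hs]
      · rw [hbit]
        by_cases hs : s = w
        · subst hs; simp; simpa [List.getD_eq_getElem?_getD] using h
        · by_cases hsw : s < w
          · simp [hsw, Nat.lt_succ_of_lt hsw]
          · have : ¬ s < w + 1 := by omega
            simp [hsw, this]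

theorem pvBlock_scal (Bm : List (List Int)) (row : List Int) (n base w j : Nat) (hj : j < n) :
    (((List.range w).foldl (fun combos s => pvCombosStep Bm n combos (base + s))
        [List.replicate n (0 : Int)]).getD
      ((List.range w).foldl
        (fun (m : Nat) s => if row.getD (base + s) (0 : Int) ≠ 0 then m ||| (1 <<< s) else m) 0)
      []).getD j 0
    = pvScal Bm row (List.range' base w) j := by
  obtain ⟨hmlt, hmbit⟩ := pvMask_spec row base w
  obtain ⟨-, hmem⟩ := pvCombos_spec Bm n base w
  obtain ⟨-, h2⟩ := hmem _ hmlt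
  rw [h2 j hj, pvScal, List.range'_eq_map_range, List.foldl_map]
  apply PySem.List.foldl_congr_mem
  intro a s hs
  have hsw : s < w := by simpa using hs
  rw [hmbit s]
  simp [hsw]

theorem pvSegs_flatten (n t : Nat) (ht : 0 < t) : ∀ fuel b, n - b ≤ fuel →
    ((List.range' b ((n - b + t - 1) / t) t).map
        (fun base => List.range' base (min t (n - base)))).flatten = List.range' b (n - b) := by
  intro fuel
  induction fuel with
  | zero =>
    intro b hb
    have hnb : n - b = 0 := by omega
    rw [hnb]
    have : (0 + t - 1) / t = 0 := Nat.div_eq_of_lt (by omega)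
    rw [this]
    rfl
  | succ fuel ih =>
    intro b hb
    by_cases hbn : n ≤ b
    · have hnb : n - b = 0 := by omega
      rw [hnb]
      have : (0 + t - 1) / t = 0 := Nat.div_eq_of_lt (by omega)
      rw [this]
      rfl
    · push Not at hbn
      have hw : min t (n - b) > 0 := by omega
      by_cases hfit : b + t ≤ n
      · -- full block
        have hcnt : (n - b + t - 1) / t = (n - (b + t) + t - 1) / t + 1 := by
          have : n - b + t - 1 = (n - (b + t) + t - 1) + t := by omega
          rw [this, Nat.add_div_right _ ht]
        rw [hcnt, List.range'_succ, List.map_cons, List.flatten_cons,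
          ih (b + t) (by omega)]
        have hmin : min t (n - b) = t := by omega
        rw [hmin]
        have : n - b = t + (n - (b + t)) := by omega
        rw [this, List.range'_append_1]
      · -- last partial block
        push Not at hfit
        have hcnt : (n - b + t - 1) / t = 1 := by
          have h1 : n - b + t - 1 = (n - b - 1) + t := by omega
          rw [h1, Nat.add_div_right _ ht, Nat.div_eq_of_lt (by omega)]
        rw [hcnt]
        have hmin : min t (n - b) = n - b := by omega
        have hcnt2 : (n - (b + t) + t - 1) / t = 0 := Nat.div_eq_of_lt (by omega)
        rw [List.range'_succ]
        simp [hmin]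

theorem pvAccFold {α : Type} (n : Nat) (L : List α) (cf : α → List Int)
    (acc : List Int) (ha : acc.length = n) :
    (L.foldl (fun acc x =>
        (List.range n).map (fun j => PySem.Int.bxor (acc.getD j 0) ((cf x).getD j 0))) acc).length = n
    ∧ ∀ j, j < n →
      (L.foldl (fun acc x =>
          (List.range n).map (fun j => PySem.Int.bxor (acc.getD j 0) ((cf x).getD j 0))) acc).getD j 0
        = L.foldl (fun a x => PySem.Int.bxor a ((cf x).getD j 0)) (acc.getD j 0) := by
  induction L generalizing acc with
  | nil => exact ⟨ha, fun _ _ => rfl⟩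
  | cons x L ih =>
    simp only [List.foldl_cons]
    obtain ⟨h1, h2⟩ := ih ((List.range n).map fun j => PySem.Int.bxor (acc.getD j 0) ((cf x).getD j 0)) (by simp)
    refine ⟨h1, fun j hj => ?_⟩
    rw [h2 j hj, PySem.List.getD_map_range _ n j 0 hj]

theorem pvMap_eq_map_range (l : List (List Int)) (f : List Int → List Int) :
    l.map f = (List.range l.length).map (fun i => f (l.getD i [])) := by
  apply List.ext_getElem (by simp)
  intro i h1 h2
  simp only [List.getElem_map, List.getElem_range]
  congr 1
  rw [List.getD_eq_getElem l [] (by simpa using h2)]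

theorem pvScal_blocks (Bm : List (List Int)) (row : List Int) (j : Nat)
    (bases : List Nat) (seg : Nat → List Nat) :
    bases.foldl (fun a base => PySem.Int.bxor a (pvScal Bm row (seg base) j)) 0
      = pvScal Bm row ((bases.map seg).flatten) j := by
  conv_rhs => rw [pvScal, List.foldl_flatten, List.foldl_map]
  apply Eq.symm
  apply PySem.List.foldl_congr_mem
  intro a base _
  rw [pvScal_shift]

theorem pvRowB (Bm : List (List Int)) (n t : Nat) (ht : 0 < t) (Ai : List Int) :
    (((List.range' 0 ((n + t - 1) / t) t).zip ((List.range' 0 ((n + t - 1) / t) t).map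
        (fun base => (List.range (min t (n - base))).foldl
          (fun combos s => pvCombosStep Bm n combos (base + s)) [List.replicate n (0 : Int)]))).foldl
      (fun (acc : List Int) (bc : Nat × List (List Int)) =>
        (List.range n).map (fun j => PySem.Int.bxor (acc.getD j 0)
          ((bc.2.getD ((List.range (min t (n - bc.1))).foldl
            (fun (m : Nat) s => if Ai.getD (bc.1 + s) (0 : Int) ≠ 0 then m ||| (1 <<< s) else m) 0)
            []).getD j 0)))
      (List.replicate n (0 : Int)))
    = (List.range n).map (fun j => pvScal Bm Ai (List.range n) j) := by
  rw [← List.map_prod_left_eq_zip, List.foldl_map]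
  obtain ⟨h1, h2⟩ := pvAccFold n (List.range' 0 ((n + t - 1) / t) t)
    (fun base => ((List.range (min t (n - base))).foldl
        (fun combos s => pvCombosStep Bm n combos (base + s)) [List.replicate n (0 : Int)]).getD
      ((List.range (min t (n - base))).foldl
        (fun (m : Nat) s => if Ai.getD (base + s) (0 : Int) ≠ 0 then m ||| (1 <<< s) else m) 0) [])
    (List.replicate n (0 : Int)) (by simp)
  refine pvEq_map_range _ n _ h1 (fun j hj => ?_)
  rw [h2 j hj, List.getD_replicate _ hj]
  have hcong : ∀ (a : Int), ∀ base ∈ List.range' 0 ((n + t - 1) / t) t,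
      PySem.Int.bxor a ((((List.range (min t (n - base))).foldl
          (fun combos s => pvCombosStep Bm n combos (base + s)) [List.replicate n (0 : Int)]).getD
        ((List.range (min t (n - base))).foldl
          (fun (m : Nat) s => if Ai.getD (base + s) (0 : Int) ≠ 0 then m ||| (1 <<< s) else m) 0)
        []).getD j 0)
      = PySem.Int.bxor a (pvScal Bm Ai (List.range' base (min t (n - base))) j) := by
    intro a base _
    rw [pvBlock_scal Bm Ai n base (min t (n - base)) j hj]
  rw [PySem.List.foldl_congr_mem _ _ _ _ hcong, pvScal_blocks]
  congr 1
  have := pvSegs_flatten n t ht n 0 (by omega)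
  simpa [List.range_eq_range'] using this

theorem pvB_eq (A B : List (List Int)) :
    naive_matrix_multiply_z2_alt A B = pvSpec A B := by
  by_cases hA : A.length = 0
  · unfold naive_matrix_multiply_z2_alt pvSpec
    rw [if_pos hA, hA]
    simp
  · unfold naive_matrix_multiply_z2_alt
    rw [if_neg hA]
    simp only [PySem.List.foldl_append_singleton_eq_map, List.nil_append]
    rw [pvMap_eq_map_range]
    unfold pvSpec
    apply List.map_congr_left
    intro i _
    exact pvRowB B A.length (max 1 (PySem.Int.bitLength (A.length : Int) - 1))
      (by omega) (A.getD i [])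
theorem naive_matrix_multiply_z2_spec : Claim_equal_naive_matrix_multiply_z2 := by
  intro A B _ _
  unfold Spec_naive_matrix_multiply_z2
  rw [pvA_eq, pvB_eq]
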